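-- pv_equiv track=rewrite | github.com/JackLongKing/Hello-World | ShellTest.py | CompareString
-- ===== SOURCE A (Python) =====
-- def CompareString(fileList,txtList):
--     target=None
--     for i in range(0,len(fileList)):
--         if fileList[i] in txtList:
--             continue
--         else:
--             target=fileList[i]
--     return target
-- ===== SOURCE B (Python) =====
-- def CompareString(fileList, txtList):
--     for x in reversed(fileList):
--         if x not in txtList:
--             return x
--     return None
-- ===== Notes on version B (the rewrite author's own statement) =====
-- stated objective: faster
-- what changed: Replaces A's forward scan that keeps overwriting a target accumulator with a backward search that returns the first non-member from the end and short-circuits.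
import Mathlib
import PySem

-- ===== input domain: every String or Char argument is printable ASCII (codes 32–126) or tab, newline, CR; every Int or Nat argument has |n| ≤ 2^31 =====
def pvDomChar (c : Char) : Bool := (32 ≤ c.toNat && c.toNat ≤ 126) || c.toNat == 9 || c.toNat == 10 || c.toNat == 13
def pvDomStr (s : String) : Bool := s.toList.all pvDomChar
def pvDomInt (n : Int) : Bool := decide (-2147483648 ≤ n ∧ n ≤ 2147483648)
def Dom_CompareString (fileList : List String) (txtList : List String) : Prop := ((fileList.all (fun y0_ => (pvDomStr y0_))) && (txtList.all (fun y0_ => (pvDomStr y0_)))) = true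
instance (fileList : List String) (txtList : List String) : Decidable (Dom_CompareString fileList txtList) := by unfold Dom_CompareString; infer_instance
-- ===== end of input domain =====

-- B replaces A's forward overwrite-accumulator scan with a backward short-circuiting search (alternative decomposition, same result).


-- ===== PORT A =====
-- for i in range(0, len(fileList)): if fileList[i] in txtList: continue else: target = fileList[i]
def CompareString (fileList : List String) (txtList : List String) : Option String :=
  (PySem.List.pyRange 0 (fileList.length : Int) 1).foldl
    (fun target i =>
      if txtList.contains (PySem.List.pyGetD fileList i "") then target
      else some (PySem.List.pyGetD fileList i ""))
    none

-- ===== PORT B =====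
-- for x in reversed(fileList): if x not in txtList: return x; return None
def CompareString_alt (fileList : List String) (txtList : List String) : Option String :=
  fileList.reverse.find? (fun x => !txtList.contains x)

-- ===== PRECONDITION & SPEC =====
def Spec_CompareString (fileList : List String) (txtList : List String) (out : Option String) : Prop := out = CompareString_alt fileList txtList
instance (fileList : List String) (txtList : List String) (out : Option String) : Decidable (Spec_CompareString fileList txtList out) := by unfold Spec_CompareString; infer_instance

-- ===== CLAIM (what is proved, stated in full; the proofs are below) =====
def Claim_equal_CompareString : Prop := ∀ (fileList : List String) (txtList : List String), Dom_CompareString fileList txtList → Spec_CompareString fileList txtList (CompareString fileList txtList)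

-- ===== LEMMAS AND PROOFS =====

-- A's overwrite-loop over any list equals "first witness of the reversed list, else the initial accumulator".
theorem foldl_overwrite_eq_find_reverse (txtList : List String) (l : List String) (init : Option String) :
    l.foldl (fun target x => if txtList.contains x then target else some x) init
      = (l.reverse.find? (fun x => !txtList.contains x)).or init := by
  induction l generalizing init with
  | nil => simp
  | cons a t ih =>
      simp only [List.foldl_cons, List.reverse_cons, List.find?_append, ih]
      cases h : t.reverse.find? (fun x => !txtList.contains x) with
      | some y => simp [Option.or]
      | none =>
          by_cases hm : a ∈ txtList <;> simp [hm, Option.or]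

-- ===== VERDICT (by name: the statement is the Claim_ definition above) =====
theorem CompareString_spec : Claim_equal_CompareString := by
  intro fileList txtList _
  unfold Spec_CompareString CompareString CompareString_alt
  rw [PySem.List.foldl_pyRange_zero_pyGetD' fileList ""
        (fun target x => if txtList.contains x then target else some x) none]
  rw [foldl_overwrite_eq_find_reverse]
  exact Option.or_none
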